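-- pv_equiv track=rewrite | github.com/Nicub20/Smart_Librarian | src/rag.py | parse_recommendation_response
-- ===== SOURCE A (Python) =====
-- from typing import Any, Dict, List
--
-- def parse_recommendation_response(raw_response: str) -> Dict[str, str]:
-- 	# Parse structured lines safely and degrade gracefully if format drifts.
-- 	recommended_title = "Unknown"
-- 	why_it_matches = "Could not parse model output safely."
--
-- 	for line in raw_response.splitlines():
-- 		stripped = line.strip()
-- 		if stripped.lower().startswith("recommended title:"):
-- 			recommended_title = stripped.split(":", 1)[1].strip() or "Unknown"
-- 		elif stripped.lower().startswith("why it matches:"):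
-- 			why_it_matches = stripped.split(":", 1)[1].strip() or why_it_matches
--
-- 	if recommended_title == "Unknown" and raw_response.strip():
-- 		first_line = raw_response.strip().splitlines()[0].strip()
-- 		recommended_title = first_line[:120] if first_line else "Unknown"
--
-- 	return {
-- 		"recommended_title": recommended_title,
-- 		"why_it_matches": why_it_matches,
-- 	}
-- ===== SOURCE B (Python) =====
-- def _field_values(raw_response, prefix):
--     stripped = [line.strip() for line in raw_response.splitlines()]
--     return [s.split(":", 1)[1].strip() for s in stripped if s.lower().startswith(prefix)]
--
-- def parse_recommendation_response(raw_response):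
--     tvals = _field_values(raw_response, "recommended title:")
--     wvals = [v for v in _field_values(raw_response, "why it matches:") if v]
--     recommended_title = (tvals[-1] or "Unknown") if tvals else "Unknown"
--     why_it_matches = wvals[-1] if wvals else "Could not parse model output safely."
--     if recommended_title == "Unknown" and raw_response.strip():
--         first_line = raw_response.strip().splitlines()[0].strip()
--         recommended_title = first_line[:120] if first_line else "Unknown"
--     return {
--         "recommended_title": recommended_title,
--         "why_it_matches": why_it_matches,
--     }
-- ===== Notes on version B (the rewrite author's own statement) =====
-- stated objective: alternative
-- what changed: Replaces the single interleaved two-state if/elif loop with a field-oriented decomposition: a helper collects all values for a given prefix per field, then last-match/last-nonempty-match logic picks each field's value.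
import Mathlib
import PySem

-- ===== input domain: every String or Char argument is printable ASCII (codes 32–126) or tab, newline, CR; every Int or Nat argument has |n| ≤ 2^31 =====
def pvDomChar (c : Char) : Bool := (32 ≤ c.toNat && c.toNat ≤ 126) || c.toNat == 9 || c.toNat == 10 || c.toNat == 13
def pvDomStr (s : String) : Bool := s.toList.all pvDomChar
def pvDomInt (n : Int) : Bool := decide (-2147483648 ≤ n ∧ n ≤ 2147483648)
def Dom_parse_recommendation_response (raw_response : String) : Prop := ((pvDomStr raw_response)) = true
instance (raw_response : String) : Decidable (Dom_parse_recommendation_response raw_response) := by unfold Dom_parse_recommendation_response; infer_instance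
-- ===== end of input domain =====

-- B is an alternative decomposition: one helper collects the split values of every
-- line matching a prefix, then last-match / last-nonempty-match logic picks each field.

-- ===== PORT A =====
-- shared sub-expression of both Pythons: stripped.split(":", 1)[1].strip()
-- (the index [1] is total here: it is only applied to lines that contain ':', so
-- split(":", 1) has two parts; List.getD 1 "" equals Python's parts[1] there)
def pvSplitVal (s : String) : String :=
  PySem.Str.strip (((PySem.Str.splitMax? s ":" 1).getD []).getD 1 "")

def pvStepA (tw : String × String) (line : String) : String × String :=
  let stripped := PySem.Str.strip line
  if PySem.Str.startswith (PySem.Str.lower stripped) "recommended title:" then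
    ((if pvSplitVal stripped = "" then "Unknown" else pvSplitVal stripped), tw.2)
  else if PySem.Str.startswith (PySem.Str.lower stripped) "why it matches:" then
    (tw.1, (if pvSplitVal stripped = "" then tw.2 else pvSplitVal stripped))
  else tw

def parse_recommendation_response (raw_response : String) : List (String × String) :=
  let tw := (PySem.Str.splitlines raw_response).foldl pvStepA
      ("Unknown", "Could not parse model output safely.")
  let recommended_title :=
    if tw.1 = "Unknown" ∧ PySem.Str.strip raw_response ≠ "" then
      let first_line := PySem.Str.strip
        ((PySem.Str.splitlines (PySem.Str.strip raw_response)).getD 0 "")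
      if first_line ≠ "" then PySem.Str.slice first_line none (some 120) else "Unknown"
    else tw.1
  [("recommended_title", recommended_title), ("why_it_matches", tw.2)]

-- ===== PORT B =====
def pvFieldValues (raw_response prefx : String) : List String :=
  let stripped := (PySem.Str.splitlines raw_response).map PySem.Str.strip
  (stripped.filter (fun s => PySem.Str.startswith (PySem.Str.lower s) prefx)).map pvSplitVal

def parse_recommendation_response_alt (raw_response : String) : List (String × String) :=
  let tvals := pvFieldValues raw_response "recommended title:"
  let wvals := (pvFieldValues raw_response "why it matches:").filter (fun v => v ≠ "")
  let title0 :=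
    match tvals.getLast? with
    | some v => if v = "" then "Unknown" else v
    | none => "Unknown"
  let why_it_matches := wvals.getLast?.getD "Could not parse model output safely."
  let recommended_title :=
    if title0 = "Unknown" ∧ PySem.Str.strip raw_response ≠ "" then
      let first_line := PySem.Str.strip
        ((PySem.Str.splitlines (PySem.Str.strip raw_response)).getD 0 "")
      if first_line ≠ "" then PySem.Str.slice first_line none (some 120) else "Unknown"
    else title0
  [("recommended_title", recommended_title), ("why_it_matches", why_it_matches)]

-- ===== PRECONDITION & SPEC =====
def Spec_parse_recommendation_response (raw_response : String) (out : List (String × String)) : Prop := out = parse_recommendation_response_alt raw_response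
instance (raw_response : String) (out : List (String × String)) : Decidable (Spec_parse_recommendation_response raw_response out) := by unfold Spec_parse_recommendation_response; infer_instance

-- ===== CLAIM (what is proved, stated in full; the proofs are below) =====
def Claim_equal_parse_recommendation_response : Prop := ∀ (raw_response : String), Dom_parse_recommendation_response raw_response → Spec_parse_recommendation_response raw_response (parse_recommendation_response raw_response)

-- ===== LEMMAS AND PROOFS =====

def pvP1 (s : String) : Bool := PySem.Str.startswith (PySem.Str.lower s) "recommended title:"
def pvP2 (s : String) : Bool := PySem.Str.startswith (PySem.Str.lower s) "why it matches:"

-- B's last-match selectors, as proof-side functions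
def pvTitleOf (t : String) (l : List String) : String :=
  match l.getLast? with
  | some v => if v = "" then "Unknown" else v
  | none => t

def pvWhyOf (w : String) (l : List String) : String := l.getLast?.getD w

lemma pvTitleOf_cons (t v : String) (l : List String) :
    pvTitleOf t (v :: l) = pvTitleOf (if v = "" then "Unknown" else v) l := by
  cases l with
  | nil => rfl
  | cons x xs =>
    cases h : (x :: xs).getLast? with
    | none => simp at h
    | some u => simp [pvTitleOf, List.getLast?_cons_cons, h]

lemma pvWhyOf_cons (w v : String) (l : List String) :
    pvWhyOf w (v :: l) = pvWhyOf v l := by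
  cases l with
  | nil => rfl
  | cons x xs =>
    cases h : (x :: xs).getLast? with
    | none => simp at h
    | some u => simp [pvWhyOf, List.getLast?_cons_cons, h]

-- the two prefixes are mutually exclusive (they start with different characters)
lemma pvP1_P2_exclusive (s : String) : ¬ (pvP1 s = true ∧ pvP2 s = true) := by
  rintro ⟨h1, h2⟩
  simp only [pvP1, pvP2, PySem.Str.startswith_eq, PySem.Chars.startswith_iff] at h1 h2
  obtain ⟨u, hu⟩ := h1
  obtain ⟨v, hv⟩ := h2
  have h := hu.trans hv.symm
  have e1 : "recommended title:".toList =
      ['r','e','c','o','m','m','e','n','d','e','d',' ','t','i','t','l','e',':'] := by decide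
  have e2 : "why it matches:".toList =
      ['w','h','y',' ','i','t',' ','m','a','t','c','h','e','s',':'] := by decide
  rw [e1, e2] at h
  simp at h

-- the fold of A's loop body computes, componentwise, B's last-match values
lemma pvFold_eq (lines : List String) : ∀ (t w : String),
    lines.foldl pvStepA (t, w) =
      (pvTitleOf t (((lines.map PySem.Str.strip).filter pvP1).map pvSplitVal),
       pvWhyOf w (((((lines.map PySem.Str.strip).filter pvP2).map pvSplitVal).filter
          (fun v => v ≠ "")))) := by
  induction lines with
  | nil => intro t w; rfl
  | cons line rest ih =>
    intro t w
    have hstep : pvStepA (t, w) line =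
        (let s := PySem.Str.strip line
         if pvP1 s then ((if pvSplitVal s = "" then "Unknown" else pvSplitVal s), w)
         else if pvP2 s then (t, (if pvSplitVal s = "" then w else pvSplitVal s))
         else (t, w)) := rfl
    by_cases h1 : pvP1 (PySem.Str.strip line) = true
    · have h2 : pvP2 (PySem.Str.strip line) = false := by
        by_contra h
        exact pvP1_P2_exclusive _ ⟨h1, by simpa using h⟩
      simp only [List.foldl_cons, hstep, h1, if_true, List.map_cons, List.filter_cons, h2,
        Bool.false_eq_true, ite_false]
      rw [ih, pvTitleOf_cons]
    · simp only [Bool.not_eq_true] at h1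
      by_cases h2 : pvP2 (PySem.Str.strip line) = true
      · simp only [List.foldl_cons, hstep, h1, Bool.false_eq_true, ite_false, h2, if_true,
          List.map_cons, List.filter_cons]
        by_cases hv : pvSplitVal (PySem.Str.strip line) = ""
        · simp only [hv, if_true, ne_eq, not_true_eq_false, decide_false,
            Bool.false_eq_true, ite_false]
          exact ih t w
        · simp only [hv, ite_false, ne_eq, not_false_eq_true, decide_true,
            if_true]
          rw [ih, pvWhyOf_cons]
      · simp only [Bool.not_eq_true] at h2
        simp only [List.foldl_cons, hstep, h1, h2, Bool.false_eq_true, ite_false,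
          List.map_cons, List.filter_cons]
        exact ih t w

-- ===== VERDICT (by name: the statement is the Claim_ definition above) =====
theorem parse_recommendation_response_spec : Claim_equal_parse_recommendation_response := by
  intro raw _
  unfold Spec_parse_recommendation_response parse_recommendation_response parse_recommendation_response_alt pvFieldValues
  rw [pvFold_eq]
  rfl
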